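-- pv_equiv track=rewrite | github.com/LoganJQuick/advent | 2025/Day 7/day_7.py | num_rays
-- ===== SOURCE A (Python) =====
-- def num_rays(lines):
--   curr_rays = [n for n in range(len(lines[0])) if lines[0][n] == 'S']
--   curr_rays = {curr_rays[0]: 1}
--   for line in lines[1:]:
--     new_rays = {}
--     for ray in curr_rays:
--       ways = curr_rays[ray]
--       if line[ray] == '^':
--         new_rays[ray-1] = new_rays.get(ray-1, 0) + ways
--         new_rays[ray+1] = new_rays.get(ray+1, 0) + ways
--       else:
--         new_rays[ray] = new_rays.get(ray, 0) + ways
--     curr_rays = new_rays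
--   return sum([curr_rays[n] for n in curr_rays])
-- ===== SOURCE B (Python) =====
-- def num_rays(lines):
--     s = lines[0].index('S')
--     m = len(lines)
--     # forward pass: the set of columns a ray can occupy before each row
--     reach = [{s}]
--     for i in range(1, m):
--         nxt = set()
--         for c in reach[i - 1]:
--             if lines[i][c] == '^':
--                 nxt.add(c - 1)
--                 nxt.add(c + 1)
--             else:
--                 nxt.add(c)
--         reach.append(nxt)
--     # backward pass: number of continuations to the bottom, only on reached cells
--     g = {c: 1 for c in reach[m - 1]}
--     for i in range(m - 1, 0, -1):
--         g = {c: g[c - 1] + g[c + 1] if lines[i][c] == '^' else g[c]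
--              for c in reach[i - 1]}
--     return g[s]
-- ===== Notes on version B (the rewrite author's own statement) =====
-- stated objective: alternative
-- what changed: A propagates a dict of ray counts forward row by row and sums the final frontier; B makes a forward pass that records only the reachable column set of each row and then a backward dynamic program over exactly those cells, reading the answer at the start column.
import Mathlib
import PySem

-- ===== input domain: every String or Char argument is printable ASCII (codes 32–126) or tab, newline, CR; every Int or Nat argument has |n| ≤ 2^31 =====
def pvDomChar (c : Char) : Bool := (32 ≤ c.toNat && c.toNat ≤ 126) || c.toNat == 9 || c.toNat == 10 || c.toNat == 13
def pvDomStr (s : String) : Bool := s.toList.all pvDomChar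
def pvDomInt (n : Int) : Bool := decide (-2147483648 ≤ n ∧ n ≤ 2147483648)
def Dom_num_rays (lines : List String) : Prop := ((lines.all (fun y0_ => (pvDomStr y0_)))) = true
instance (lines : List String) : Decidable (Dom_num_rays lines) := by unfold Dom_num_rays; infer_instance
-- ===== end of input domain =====

-- B replaces A's forward frontier-dict count propagation by a forward reachable-column-set pass plus a backward dynamic program over exactly the reached cells (alternative decomposition, similar cost).


-- ===== PORT A =====
-- A-side helper: the body of A's inner loop 'for ray in curr_rays: …' (Python's
-- curr_rays[ray] is exact as getD because ray is iterated from curr's keys)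
def pvAbody (curr : PySem.Dict Int Int) (line : String) (news : PySem.Dict Int Int) (ray : Int) :
    PySem.Dict Int Int :=
  let ways := curr.getD ray 0
  if ((PySem.Str.pyGet? line ray).getD ' ') == '^' then
    let n1 := news.insert (ray - 1) (news.getD (ray - 1) 0 + ways)
    n1.insert (ray + 1) (n1.getD (ray + 1) 0 + ways)
  else news.insert ray (news.getD ray 0 + ways)

-- A-side helper: one iteration of A's outer loop 'for line in lines[1:]: …'
def pvAstep (curr : PySem.Dict Int Int) (line : String) : PySem.Dict Int Int :=
  curr.keys.foldl (pvAbody curr line) PySem.Dict.empty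

-- lines[0], curr_rays[0] and line[ray] use the total getD forms of the PySem index
-- primitives: the inputs where Python raises IndexError there are excluded by Pre_num_rays.
def num_rays (lines : List String) : Int :=
  let line0 := PySem.List.pyGetD lines 0 ""
  let cand := (PySem.List.pyRange 0 (PySem.Str.len line0) 1).filter
      (fun n => ((PySem.Str.pyGet? line0 n).getD ' ') == 'S')
  let curr0 : PySem.Dict Int Int := PySem.Dict.empty.insert (PySem.List.pyGetD cand 0 0) 1
  let final := (PySem.List.slice lines (some 1) none).foldl pvAstep curr0
  (final.keys.map (fun n => final.getD n 0)).sum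

-- ===== PORT B =====
-- B-side helper (also used by Pre_num_rays): B's inner forward loop building the next
-- reachable column set; line[c] via the total getD form as in port A
def pvStepSet (S : PySem.Set Int) (line : String) : PySem.Set Int :=
  S.foldl (fun nxt c =>
    if ((PySem.Str.pyGet? line c).getD ' ') == '^' then
      PySem.Set.add (PySem.Set.add nxt (c - 1)) (c + 1)
    else PySem.Set.add nxt c) PySem.Set.empty

-- B-side helper: one backward-DP row of B, the dict comprehension over reach[i-1]
def pvBrowAlt (lines : List String) (reach : List (PySem.Set Int))
    (g : PySem.Dict Int Int) (i : Int) : PySem.Dict Int Int :=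
  (PySem.List.pyGetD reach (i - 1) PySem.Set.empty).foldl
    (fun d c => d.insert c
      (if ((PySem.Str.pyGet? (PySem.List.pyGetD lines i "") c).getD ' ') == '^'
       then g.getD (c - 1) 0 + g.getD (c + 1) 0 else g.getD c 0))
    PySem.Dict.empty

-- lines[0].index('S') is ported as PySem.Str.find: exact whenever 'S' occurs in lines[0]
-- (Pre_num_rays guarantees it); reach[i-1], lines[i], g[...] via the total getD forms
-- (exact: those indices are in range on every input Pre_num_rays admits).
def num_rays_alt (lines : List String) : Int :=
  let line0 := PySem.List.pyGetD lines 0 ""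
  let s := PySem.Str.find line0 "S"
  let m : Int := (lines.length : Int)
  let reach := (PySem.List.pyRange 1 m 1).foldl
    (fun reach i => reach ++
      [pvStepSet (PySem.List.pyGetD reach (i - 1) PySem.Set.empty) (PySem.List.pyGetD lines i "")])
    [PySem.Set.ofList [s]]
  let g0 := (PySem.List.pyGetD reach (m - 1) PySem.Set.empty).foldl
    (fun d c => d.insert c 1) PySem.Dict.empty
  let gf := (PySem.List.pyRange (m - 1) 0 (-1)).foldl (pvBrowAlt lines reach) g0
  gf.getD s 0

-- ===== PRECONDITION & SPEC =====
-- every reached column must be a valid Python index of its row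
def pvRowOK (line : String) (S : PySem.Set Int) : Bool :=
  S.all (fun c => decide (-(PySem.Str.len line) ≤ c ∧ c < PySem.Str.len line))

-- walks the rows once checking ONLY which columns get read (no path counts are computed)
def pvReachOK : List String → PySem.Set Int → Bool
  | [], _ => true
  | l :: rest, S => pvRowOK l S && pvReachOK rest (pvStepSet S l)

-- Pre_ excludes exactly the inputs on which Python A raises: an empty list (IndexError on
-- lines[0]), no 'S' in the first row (IndexError on curr_rays[0]), or some reached ray
-- column outside the Python index range of its row (IndexError on line[ray]); both
-- programs raise there and nothing else is excluded.
def Pre_num_rays (lines : List String) : Prop :=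
  lines ≠ [] ∧ 'S' ∈ (lines.headD "").toList ∧
  pvReachOK lines.tail
    (PySem.Set.ofList [(((lines.headD "").toList.idxOf 'S' : Nat) : Int)]) = true
instance (lines : List String) : Decidable (Pre_num_rays lines) := by
  unfold Pre_num_rays; infer_instance

def pvWitness_num_rays : List String := ["S^.", ".x."]

def Spec_num_rays (lines : List String) (out : Int) : Prop := out = num_rays_alt lines
instance (lines : List String) (out : Int) : Decidable (Spec_num_rays lines out) := by
  unfold Spec_num_rays; infer_instance

-- ===== CLAIM (what is proved, stated in full; the proofs are below) =====
def Claim_equal_num_rays : Prop := ∀ (lines : List String), Dom_num_rays lines → Pre_num_rays lines → Spec_num_rays lines (num_rays lines)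

-- ===== LEMMAS AND PROOFS =====

-- the common mathematical value: the number of ray paths through the remaining rows
-- starting at column c (both ports are shown to compute it)
def pvPC : List String → Int → Int
  | [], _ => 1
  | l :: rest, c =>
      if ((PySem.Str.pyGet? l c).getD ' ') == '^' then pvPC rest (c - 1) + pvPC rest (c + 1)
      else pvPC rest c

-- weighted sum of a dict's items against a column weight φ
def pvW (φ : Int → Int) (l : List (Int × Int)) : Int := (l.map (fun p => p.2 * φ p.1)).sum

theorem pvPC_pos (l : String) (rest : List String) (c : Int)
    (hch : (((PySem.Str.pyGet? l c).getD ' ') == '^') = true) :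
    pvPC (l :: rest) c = pvPC rest (c - 1) + pvPC rest (c + 1) := by
  simp only [pvPC, hch, if_true]

theorem pvPC_neg (l : String) (rest : List String) (c : Int)
    (hch : (((PySem.Str.pyGet? l c).getD ' ') == '^') = false) :
    pvPC (l :: rest) c = pvPC rest c := by
  simp only [pvPC, hch, Bool.false_eq_true, if_false]

theorem pvW_nil (φ : Int → Int) : pvW φ [] = 0 := rfl
theorem pvW_cons (φ : Int → Int) (p : Int × Int) (t : List (Int × Int)) :
    pvW φ (p :: t) = p.2 * φ p.1 + pvW φ t := by simp [pvW]
theorem pvW_append (φ : Int → Int) (l₁ l₂ : List (Int × Int)) :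
    pvW φ (l₁ ++ l₂) = pvW φ l₁ + pvW φ l₂ := by simp [pvW]

theorem pv_nodup_keys_insert (d : PySem.Dict Int Int) (k v : Int) (h : d.keys.Nodup) :
    (d.insert k v).keys.Nodup := by
  unfold PySem.Dict.insert
  split
  · show (List.map Prod.fst (d.items.map (fun p => if p.1 == k then (k, v) else p))).Nodup
    rw [List.map_map]
    have : (Prod.fst ∘ fun p : Int × Int => if p.1 == k then (k, v) else p) = Prod.fst := by
      funext p; by_cases hp : p.1 = k
      · simp [hp]
      · simp only [Function.comp_apply, beq_iff_eq, hp, if_false]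
    rw [this]; exact h
  · show (List.map Prod.fst (d.items ++ [(k, v)])).Nodup
    rw [List.map_append]
    simp only [List.map_cons, List.map_nil]
    rw [List.nodup_append]
    refine ⟨h, List.nodup_singleton _, ?_⟩
    intro a ha b hb
    rw [List.mem_singleton] at hb; subst hb
    intro heq; subst heq
    rename_i hc
    simp only [PySem.Dict.contains, List.any_eq_true, beq_iff_eq] at hc
    push_neg at hc
    simp only [List.mem_map] at ha
    obtain ⟨p, hp, hpk⟩ := ha
    exact hc p hp hpk

theorem pv_getD_of_not_contains (d : PySem.Dict Int Int) (k : Int) (h : d.contains k = false) :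
    d.getD k 0 = 0 := by
  simp only [PySem.Dict.getD, PySem.Dict.get?]
  have hf : d.items.find? (fun p => p.1 == k) = none := by
    rw [List.find?_eq_none]
    intro p hp
    have := List.any_eq_false.mp h p hp
    simpa using this
  simp [hf]

theorem pv_wsum_overwrite (k nv : Int) (φ : Int → Int) :
    ∀ l : List (Int × Int), (l.map Prod.fst).Nodup → l.any (fun p => p.1 == k) = true →
    pvW φ (l.map (fun p => if p.1 == k then (k, nv) else p)) =
      pvW φ l - ((Option.map Prod.snd (l.find? (fun p => p.1 == k))).getD 0) * φ k + nv * φ k := by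
  intro l
  induction l with
  | nil => intro _ h; simp at h
  | cons p t ih =>
    intro hnd hany
    by_cases hp : p.1 = k
    · have hbeq : (p.1 == k) = true := by simpa using hp
      have hmem : p.1 ∉ t.map Prod.fst := (by simpa using hnd : p.1 ∉ t.map Prod.fst ∧ _).1
      have ht : t.map (fun q => if q.1 == k then (k, nv) else q) = t := by
        have hq : ∀ q ∈ t, (if q.1 == k then (k, nv) else q) = id q := by
          intro q hq
          have : ¬ (q.1 == k) = true := by
            intro hqk
            exact hmem (List.mem_map.mpr ⟨q, hq, by rw [hp]; exact (by simpa using hqk)⟩)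
          simp [this]
        rw [List.map_congr_left hq, List.map_id]
      have hfind : List.find? (fun q => q.1 == k) (p :: t) = some p := by
        rw [List.find?_cons]; simp [hbeq]
      simp only [List.map_cons, hbeq, if_true, hfind, ht]
      rw [pvW_cons, pvW_cons]
      simp only [Option.map_some, Option.getD_some, hp]
      ring
    · have hbeq : (p.1 == k) = false := by simpa using hp
      have hany' : t.any (fun p => p.1 == k) = true := by
        simpa [hbeq] using hany
      have hnd' : (t.map Prod.fst).Nodup := (by simpa using hnd : _ ∧ (t.map Prod.fst).Nodup).2
      have hfind : List.find? (fun q => q.1 == k) (p :: t) = List.find? (fun q => q.1 == k) t := by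
        rw [List.find?_cons]; simp [hbeq]
      simp only [List.map_cons, hbeq, Bool.false_eq_true, if_false, hfind]
      rw [pvW_cons, pvW_cons, ih hnd' hany']
      ring

theorem pv_wsum_insert_add (d : PySem.Dict Int Int) (h : d.keys.Nodup) (k v : Int) (φ : Int → Int) :
    pvW φ ((d.insert k (d.getD k 0 + v)).items) = pvW φ d.items + v * φ k := by
  unfold PySem.Dict.insert
  split
  · rename_i hc
    show pvW φ (d.items.map (fun p => if p.1 == k then (k, d.getD k 0 + v) else p)) = _
    rw [pv_wsum_overwrite k (d.getD k 0 + v) φ d.items h hc]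
    have : ((Option.map Prod.snd (d.items.find? (fun p => p.1 == k))).getD 0) = d.getD k 0 := rfl
    rw [this]; ring
  · rename_i hc
    show pvW φ (d.items ++ [(k, d.getD k 0 + v)]) = _
    rw [pvW_append, pvW_cons, pvW_nil,
        pv_getD_of_not_contains d k (by simpa using hc)]
    ring

theorem pvAbody_pos (d : PySem.Dict Int Int) (line : String) (news : PySem.Dict Int Int) (k : Int)
    (hch : (((PySem.Str.pyGet? line k).getD ' ') == '^') = true) :
    pvAbody d line news k =
      (news.insert (k - 1) (news.getD (k - 1) 0 + d.getD k 0)).insert (k + 1)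
        ((news.insert (k - 1) (news.getD (k - 1) 0 + d.getD k 0)).getD (k + 1) 0 + d.getD k 0) := by
  simp only [pvAbody, hch, if_true]

theorem pvAbody_neg (d : PySem.Dict Int Int) (line : String) (news : PySem.Dict Int Int) (k : Int)
    (hch : (((PySem.Str.pyGet? line k).getD ' ') == '^') = false) :
    pvAbody d line news k = news.insert k (news.getD k 0 + d.getD k 0) := by
  simp only [pvAbody, hch, Bool.false_eq_true, if_false]

theorem pv_A_inner (line : String) (rest : List String) (d : PySem.Dict Int Int)
    (ks : List Int) :
    ∀ acc : PySem.Dict Int Int, acc.keys.Nodup →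
      (ks.foldl (pvAbody d line) acc).keys.Nodup ∧
      pvW (pvPC rest) ((ks.foldl (pvAbody d line) acc).items)
        = pvW (pvPC rest) acc.items
          + (ks.map (fun k => d.getD k 0 * pvPC (line :: rest) k)).sum := by
  induction ks with
  | nil => intro acc h; exact ⟨h, by simp⟩
  | cons k ks ih =>
    intro acc h
    simp only [List.foldl_cons, List.map_cons, List.sum_cons]
    by_cases hch : (((PySem.Str.pyGet? line k).getD ' ') == '^') = true
    · rw [pvAbody_pos d line acc k hch, pvPC_pos line rest k hch]
      set n1 := acc.insert (k - 1) (acc.getD (k - 1) 0 + d.getD k 0) with hn1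
      have h1 : n1.keys.Nodup := pv_nodup_keys_insert _ _ _ h
      have h2 : (n1.insert (k + 1) (n1.getD (k + 1) 0 + d.getD k 0)).keys.Nodup :=
        pv_nodup_keys_insert _ _ _ h1
      obtain ⟨hnd, hsum⟩ := ih (n1.insert (k + 1) (n1.getD (k + 1) 0 + d.getD k 0)) h2
      refine ⟨hnd, ?_⟩
      rw [hsum, pv_wsum_insert_add n1 h1, hn1, pv_wsum_insert_add acc h]
      ring
    · have hch' : (((PySem.Str.pyGet? line k).getD ' ') == '^') = false := by
        simpa using hch
      rw [pvAbody_neg d line acc k hch', pvPC_neg line rest k hch']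
      have h1 : (acc.insert k (acc.getD k 0 + d.getD k 0)).keys.Nodup :=
        pv_nodup_keys_insert _ _ _ h
      obtain ⟨hnd, hsum⟩ := ih _ h1
      refine ⟨hnd, ?_⟩
      rw [hsum, pv_wsum_insert_add acc h]
      ring

theorem pvW_eq_keys (d : PySem.Dict Int Int) (h : d.keys.Nodup) (φ : Int → Int) :
    pvW φ d.items = (d.keys.map (fun k => d.getD k 0 * φ k)).sum := by
  rw [PySem.Dict.items_eq_map_keys d h 0, pvW, List.map_map]
  rfl

theorem pv_A_outer (rows : List String) :
    ∀ d : PySem.Dict Int Int, d.keys.Nodup →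
      (rows.foldl pvAstep d).keys.Nodup ∧
      pvW (pvPC []) ((rows.foldl pvAstep d).items) = pvW (pvPC rows) d.items := by
  induction rows with
  | nil => intro d h; exact ⟨h, rfl⟩
  | cons line rest ih =>
    intro d h
    simp only [List.foldl_cons]
    have hempty : (PySem.Dict.empty : PySem.Dict Int Int).keys.Nodup := by
      simp [PySem.Dict.empty, PySem.Dict.keys]
    obtain ⟨hnd, hsum⟩ := pv_A_inner line rest d d.keys PySem.Dict.empty hempty
    obtain ⟨hnd', hsum'⟩ := ih (pvAstep d line) hnd
    refine ⟨hnd', ?_⟩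
    rw [hsum']
    show pvW (pvPC rest) (pvAstep d line).items = _
    rw [pvAstep, hsum]
    have h0 : pvW (pvPC rest) (PySem.Dict.empty : PySem.Dict Int Int).items = 0 := rfl
    rw [h0, pvW_eq_keys d h (pvPC (line :: rest))]
    ring

theorem pv_filter_range_head (cs : List Char) :
    'S' ∈ cs →
    ((List.range cs.length).filter (fun k => (cs.getD k ' ') == 'S')).head? = some (cs.idxOf 'S') := by
  induction cs with
  | nil => intro h; simp at h
  | cons x t ih =>
    intro h
    rw [List.length_cons, List.range_succ_eq_map]
    by_cases hx : x = 'S'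
    · simp [hx, List.filter_cons]
    · have hmem : 'S' ∈ t := by
        rcases List.mem_cons.mp h with h1 | h1
        · exact absurd h1.symm hx
        · exact h1
      have hpred : ((x :: t).getD 0 ' ' == 'S') = false := by simpa using hx
      rw [List.filter_cons]
      simp only [hpred, Bool.false_eq_true, if_false]
      rw [List.filter_map]
      have hcomp : ((fun k => ((x :: t).getD k ' ' == 'S')) ∘ Nat.succ)
          = (fun k => (t.getD k ' ' == 'S')) := by
        funext k; simp [List.getD]
      rw [hcomp, List.head?_map, ih hmem]
      simp [List.idxOf_cons, hx]

theorem pv_find_go (cs : List Char) (h : 'S' ∈ cs) :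
    ∀ k : Nat, PySem.Chars.find.go ['S'] cs k = (k : Int) + (cs.idxOf 'S' : Int) := by
  induction cs with
  | nil => simp at h
  | cons x t ih =>
    intro k
    by_cases hx : x = 'S'
    · rw [PySem.Chars.find.go]
      have : (['S'].isPrefixOf (x :: t)) = true := by simp [List.isPrefixOf, hx]
      simp [this, hx, List.idxOf_cons]
    · have hmem : 'S' ∈ t := by
        rcases List.mem_cons.mp h with h1 | h1
        · exact absurd h1.symm hx
        · exact h1
      rw [PySem.Chars.find.go]
      have hpre : (['S'].isPrefixOf (x :: t)) = false := by
        simp [List.isPrefixOf]; exact fun hh => absurd hh.symm hx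
      simp only [hpre, Bool.false_eq_true, if_false]
      rw [ih hmem (k + 1)]
      simp [List.idxOf_cons, hx]
      push_cast
      ring

theorem pv_find_map (v : Int → Int) :
    ∀ (r : List Int) (c : Int), c ∈ r →
      (r.map (fun a => (a, v a))).find? (fun p => p.1 == c) = some (c, v c) := by
  intro r
  induction r with
  | nil => intro c hc; simp at hc
  | cons x t ih =>
    intro c hc
    by_cases hx : x = c
    · subst hx
      simp [List.find?_cons]
    · have hmem : c ∈ t := by
        rcases List.mem_cons.mp hc with h1 | h1
        · exact absurd h1.symm hx
        · exact h1
      rw [List.map_cons, List.find?_cons]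
      have : ((x, v x).1 == c) = false := by simpa using hx
      simp only [this, cond_false]
      exact ih c hmem

theorem pv_getD_insertRange (v : Int → Int) (r : List Int) (hr : r.Nodup) (c : Int) (hc : c ∈ r) :
    ((r.foldl (fun d x => d.insert x (v x)) PySem.Dict.empty).getD c 0) = v c := by
  have hitems : (r.foldl (fun d x => d.insert x (v x)) PySem.Dict.empty).items
      = PySem.Dict.empty.items ++ r.map (fun a => (a, v a)) := by
    exact PySem.Dict.items_foldl_insert_fresh r (fun a => a) v PySem.Dict.empty
      (fun a _ => rfl) (by simpa using hr)
  simp only [PySem.Dict.getD, PySem.Dict.get?, hitems]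
  have : (PySem.Dict.empty : PySem.Dict Int Int).items = [] := rfl
  rw [this, List.nil_append, pv_find_map v r c hc]
  rfl

-- reachable column set before row n (RL 0 = {start}; RL (k+1) steps through row k+1)
def pvRL (lines : List String) (s : Int) : Nat → PySem.Set Int
  | 0 => PySem.Set.ofList [s]
  | k + 1 => pvStepSet (pvRL lines s k) (PySem.List.pyGetD lines ((k : Int) + 1) "")

theorem pv_nodup_stepSet (S : PySem.Set Int) (line : String) : (pvStepSet S line).Nodup := by
  unfold pvStepSet
  have : ∀ (l : List Int) (acc : PySem.Set Int), acc.Nodup →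
      (l.foldl (fun nxt c =>
        if ((PySem.Str.pyGet? line c).getD ' ') == '^' then
          PySem.Set.add (PySem.Set.add nxt (c - 1)) (c + 1)
        else PySem.Set.add nxt c) acc).Nodup := by
    intro l
    induction l with
    | nil => intro acc h; exact h
    | cons x t ih =>
      intro acc h
      rw [List.foldl_cons]
      apply ih
      split
      · exact PySem.Set.nodup_add _ _ (PySem.Set.nodup_add _ _ h)
      · exact PySem.Set.nodup_add _ _ h
  exact this S PySem.Set.empty List.nodup_nil

theorem pv_nodup_RL (lines : List String) (s : Int) (n : Nat) : (pvRL lines s n).Nodup := by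
  cases n with
  | zero => exact PySem.Set.nodup_ofList _
  | succ k => exact pv_nodup_stepSet _ _

theorem pv_stepSet_mono (line : String) (x : Int) :
    ∀ (l : List Int) (acc : PySem.Set Int), x ∈ acc →
      x ∈ l.foldl (fun nxt c =>
        if ((PySem.Str.pyGet? line c).getD ' ') == '^' then
          PySem.Set.add (PySem.Set.add nxt (c - 1)) (c + 1)
        else PySem.Set.add nxt c) acc := by
  intro l
  induction l with
  | nil => intro acc h; exact h
  | cons a t ih =>
    intro acc h
    rw [List.foldl_cons]
    apply ih
    split
    · exact (PySem.Set.mem_add _ _ _).mpr (Or.inl ((PySem.Set.mem_add _ _ _).mpr (Or.inl h)))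
    · exact (PySem.Set.mem_add _ _ _).mpr (Or.inl h)

theorem pv_stepSet_contrib (line : String) (c : Int) :
    ∀ (l : List Int) (acc : PySem.Set Int), c ∈ l →
      (if ((PySem.Str.pyGet? line c).getD ' ') == '^' then
        (c - 1) ∈ l.foldl (fun nxt c =>
          if ((PySem.Str.pyGet? line c).getD ' ') == '^' then
            PySem.Set.add (PySem.Set.add nxt (c - 1)) (c + 1)
          else PySem.Set.add nxt c) acc ∧
        (c + 1) ∈ l.foldl (fun nxt c =>
          if ((PySem.Str.pyGet? line c).getD ' ') == '^' then
            PySem.Set.add (PySem.Set.add nxt (c - 1)) (c + 1)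
          else PySem.Set.add nxt c) acc
       else c ∈ l.foldl (fun nxt c =>
          if ((PySem.Str.pyGet? line c).getD ' ') == '^' then
            PySem.Set.add (PySem.Set.add nxt (c - 1)) (c + 1)
          else PySem.Set.add nxt c) acc) := by
  intro l
  induction l with
  | nil => intro acc h; simp at h
  | cons a t ih =>
    intro acc h
    by_cases hac : a = c
    · subst hac
      rw [List.foldl_cons]
      by_cases hch : (((PySem.Str.pyGet? line a).getD ' ') == '^') = true
      · rw [if_pos hch]
        simp only [hch, if_true]
        constructor
        · apply pv_stepSet_mono
          exact (PySem.Set.mem_add _ _ _).mpr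
            (Or.inl ((PySem.Set.mem_add _ _ _).mpr (Or.inr rfl)))
        · apply pv_stepSet_mono
          exact (PySem.Set.mem_add _ _ _).mpr (Or.inr rfl)
      · have hch' := eq_false_of_ne_true hch
        rw [if_neg (by simpa using hch')]
        simp only [hch', Bool.false_eq_true, if_false]
        apply pv_stepSet_mono
        exact (PySem.Set.mem_add _ _ _).mpr (Or.inr rfl)
    · have hmem : c ∈ t := by
        rcases List.mem_cons.mp h with h1 | h1
        · exact absurd h1.symm hac
        · exact h1
      rw [List.foldl_cons]
      exact ih _ hmem

theorem pv_stepSet_mem_pos (S : PySem.Set Int) (line : String) (c : Int) (hc : c ∈ S)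
    (hch : (((PySem.Str.pyGet? line c).getD ' ') == '^') = true) :
    (c - 1) ∈ pvStepSet S line ∧ (c + 1) ∈ pvStepSet S line := by
  have := pv_stepSet_contrib line c S PySem.Set.empty hc
  rw [if_pos hch] at this
  exact this

theorem pv_stepSet_mem_neg (S : PySem.Set Int) (line : String) (c : Int) (hc : c ∈ S)
    (hch : (((PySem.Str.pyGet? line c).getD ' ') == '^') = false) :
    c ∈ pvStepSet S line := by
  have := pv_stepSet_contrib line c S PySem.Set.empty hc
  rw [if_neg (by simpa using hch)] at this
  exact this

-- the forward fold of port B builds exactly the list of reachable sets pvRL 0 … pvRL n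
theorem pv_reach_eq (lines : List String) (s : Int) :
    ∀ n : Nat,
      (PySem.List.pyRange 1 ((n : Int) + 1) 1).foldl
        (fun reach i => reach ++
          [pvStepSet (PySem.List.pyGetD reach (i - 1) PySem.Set.empty)
            (PySem.List.pyGetD lines i "")])
        [PySem.Set.ofList [s]]
      = (List.range (n + 1)).map (pvRL lines s) := by
  intro n
  induction n with
  | zero =>
    have : PySem.List.pyRange 1 (0 + 1 : Int) 1 = [] := by decide
    rw [Nat.cast_zero, this]
    simp [List.range_succ, pvRL]
  | succ n ih =>
    have hsplit : PySem.List.pyRange 1 (((n + 1 : Nat) : Int) + 1) 1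
        = PySem.List.pyRange 1 ((n : Int) + 1) 1 ++ [(n : Int) + 1] := by
      have h2 : ((n + 1 : Nat) : Int) + 1 = ((n : Int) + 1) + 1 := by push_cast; ring
      rw [h2, PySem.List.pyRange_one_succ_right (a := 1) (b := (n : Int) + 1) (by omega)]
    rw [hsplit, List.foldl_append, ih]
    simp only [List.foldl_cons, List.foldl_nil]
    have hidx : PySem.List.pyGetD ((List.range (n + 1)).map (pvRL lines s))
        ((n : Int) + 1 - 1) PySem.Set.empty = pvRL lines s n := by
      have h1 : ((n : Int) + 1 - 1) = ((n : Nat) : Int) := by ring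
      rw [h1, PySem.List.pyGetD_natCast]
      rw [List.getD_eq_getElem _ _ (by simp)]
      simp
    rw [hidx]
    simp only [List.range_succ, List.map_append, List.map_cons, List.map_nil, List.append_assoc]
    simp [pvRL]

-- backward pass: the invariant 'g is pvPC on the reached set' descends to row 0
theorem pv_B_back (lines : List String) (reach : List (PySem.Set Int)) (s : Int)
    (hreach : ∀ k : Nat, k < lines.length →
      PySem.List.pyGetD reach ((k : Nat) : Int) PySem.Set.empty = pvRL lines s k) :
    ∀ n : Nat, n < lines.length →
    ∀ g : PySem.Dict Int Int,
      (∀ c ∈ pvRL lines s n, g.getD c 0 = pvPC (lines.drop (n + 1)) c) →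
      ∀ c ∈ pvRL lines s 0,
        ((PySem.List.pyRange ((n : Nat) : Int) 0 (-1)).foldl (pvBrowAlt lines reach) g).getD c 0
          = pvPC (lines.drop 1) c := by
  intro n
  induction n with
  | zero =>
    intro _ g hg c hc
    rw [PySem.List.pyRange_neg_one_eq_nil (by norm_num)]
    simpa using hg c hc
  | succ n ih =>
    intro hlt g hg c hc
    rw [PySem.List.pyRange_neg_one_cons (by positivity), List.foldl_cons,
      show ((n + 1 : Nat) : Int) - 1 = ((n : Nat) : Int) by push_cast; ring]
    apply ih (by omega) _ _ c hc
    intro c' hc'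
    -- one backward row: pvBrowAlt at i = n+1
    have hRLidx : PySem.List.pyGetD reach (((n + 1 : Nat) : Int) - 1) PySem.Set.empty
        = pvRL lines s n := by
      have h1 : (((n + 1 : Nat) : Int) - 1) = ((n : Nat) : Int) := by push_cast; ring
      rw [h1, hreach n (by omega)]
    have hline : PySem.List.pyGetD lines ((n + 1 : Nat) : Int) "" = lines[n + 1] := by
      rw [PySem.List.pyGetD_natCast]
      exact List.getD_eq_getElem lines "" hlt
    have hline' : PySem.List.pyGetD lines ((n : Int) + 1) "" = lines[n + 1] := by
      rw [show ((n : Int) + 1) = ((n + 1 : Nat) : Int) by push_cast; ring, hline]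
    have hdrop : lines.drop (n + 1) = lines[n + 1] :: lines.drop (n + 2) :=
      List.drop_eq_getElem_cons hlt
    unfold pvBrowAlt
    rw [hRLidx]
    rw [pv_getD_insertRange
      (fun c => if ((PySem.Str.pyGet? (PySem.List.pyGetD lines ((n + 1 : Nat) : Int) "") c).getD ' ') == '^'
        then g.getD (c - 1) 0 + g.getD (c + 1) 0 else g.getD c 0)
      (pvRL lines s n) (pv_nodup_RL lines s n) c' hc']
    rw [hline, hdrop]
    have hRLsucc : pvRL lines s (n + 1) = pvStepSet (pvRL lines s n) lines[n + 1] := by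
      show pvStepSet (pvRL lines s n) (PySem.List.pyGetD lines ((n : Int) + 1) "") = _
      rw [hline']
    by_cases hch : (((PySem.Str.pyGet? lines[n + 1] c').getD ' ') == '^') = true
    · rw [if_pos hch, pvPC_pos _ _ _ hch]
      obtain ⟨hm1, hm2⟩ := pv_stepSet_mem_pos (pvRL lines s n) lines[n + 1] c' hc' hch
      rw [← hRLsucc] at hm1 hm2
      rw [hg _ hm1, hg _ hm2]
    · have hch' := eq_false_of_ne_true hch
      rw [if_neg (by simpa using hch'), pvPC_neg _ _ _ hch']
      have hm := pv_stepSet_mem_neg (pvRL lines s n) lines[n + 1] c' hc' hch'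
      rw [← hRLsucc] at hm
      rw [hg _ hm]

theorem pv_valueSum (d : PySem.Dict Int Int) (h : d.keys.Nodup) :
    (d.keys.map (fun n => d.getD n 0)).sum = pvW (pvPC []) d.items := by
  rw [pvW_eq_keys d h]
  congr 1
  apply List.map_congr_left
  intro k _
  simp [pvPC]

theorem pv_A_eval (lines : List String) (hne : lines ≠ [])
    (hS : 'S' ∈ (lines.headD "").toList) :
    num_rays lines = pvPC lines.tail (((lines.headD "").toList.idxOf 'S' : Int)) := by
  obtain ⟨l0, rest, rfl⟩ : ∃ l0 rest, lines = l0 :: rest := by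
    cases lines with
    | nil => exact absurd rfl hne
    | cons a t => exact ⟨a, t, rfl⟩
  simp only [List.headD_cons] at hS ⊢
  simp only [num_rays, PySem.List.pyGetD_zero_cons, PySem.List.slice_from_one, List.tail_cons]
  -- the comprehension's head is the first index of 'S'
  have hlen : PySem.Str.len l0 = ((l0.toList.length : Nat) : Int) := PySem.Str.len_eq l0
  have hcand : (PySem.List.pyRange 0 (PySem.Str.len l0) 1).filter
        (fun n => ((PySem.Str.pyGet? l0 n).getD ' ') == 'S')
      = ((List.range l0.toList.length).filter
          (fun k => (l0.toList.getD k ' ') == 'S')).map (fun k : Nat => (k : Int)) := by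
    rw [hlen, PySem.List.pyRange_zero_nat, List.filter_map]
    have hp : ((fun n => ((PySem.Str.pyGet? l0 n).getD ' ') == 'S') ∘ (fun k : Nat => (k : Int)))
        = (fun k : Nat => (l0.toList.getD k ' ') == 'S') := by
      funext k
      show ((PySem.Str.pyGet? l0 (k : Int)).getD ' ' == 'S') = _
      have : PySem.Str.pyGet? l0 (k : Int) = l0.toList[k]? := by
        show PySem.List.pyGet? l0.toList (k : Int) = _
        exact PySem.List.pyGet?_natCast l0.toList k
      rw [this, List.getD_eq_getElem?_getD]
    rw [hp]
  rw [hcand]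
  obtain ⟨t0, ht0⟩ : ∃ t0, (List.range l0.toList.length).filter
      (fun k => (l0.toList.getD k ' ') == 'S') = l0.toList.idxOf 'S' :: t0 := by
    have := pv_filter_range_head l0.toList hS
    cases hcase : (List.range l0.toList.length).filter (fun k => (l0.toList.getD k ' ') == 'S') with
    | nil => rw [hcase] at this; simp at this
    | cons a t =>
      rw [hcase] at this
      simp only [List.head?_cons, Option.some_inj] at this
      exact ⟨t, by rw [this]⟩
  rw [ht0, List.map_cons, PySem.List.pyGetD_zero_cons]
  set s : Int := ((l0.toList.idxOf 'S' : Nat) : Int) with hs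
  have hk0 : (PySem.Dict.empty.insert s 1 : PySem.Dict Int Int).keys.Nodup := by
    show ([(s, (1 : Int))].map Prod.fst).Nodup
    simp
  obtain ⟨hnd, hsum⟩ := pv_A_outer rest (PySem.Dict.empty.insert s 1) hk0
  rw [pv_valueSum _ hnd, hsum]
  show pvW (pvPC rest) [(s, 1)] = _
  rw [pvW_cons, pvW_nil]
  ring

theorem pv_B_eval (lines : List String) (hne : lines ≠ [])
    (hS : 'S' ∈ (lines.headD "").toList) :
    num_rays_alt lines = pvPC lines.tail (((lines.headD "").toList.idxOf 'S' : Int)) := by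
  obtain ⟨l0, rest, rfl⟩ : ∃ l0 rest, lines = l0 :: rest := by
    cases lines with
    | nil => exact absurd rfl hne
    | cons a t => exact ⟨a, t, rfl⟩
  simp only [List.headD_cons] at hS ⊢
  simp only [num_rays_alt, PySem.List.pyGetD_zero_cons]
  have hfind : PySem.Str.find l0 "S" = ((l0.toList.idxOf 'S' : Nat) : Int) := by
    show PySem.Chars.find l0.toList "S".toList = _
    have : "S".toList = ['S'] := rfl
    rw [this, PySem.Chars.find]
    rw [pv_find_go l0.toList hS 0]
    simp
  rw [hfind]
  set s : Int := ((l0.toList.idxOf 'S' : Nat) : Int) with hs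
  set L : Nat := rest.length with hL
  have hlen : ((l0 :: rest).length : Int) = ((L : Nat) : Int) + 1 := by
    simp [hL]
  rw [hlen]
  have hreachlist := pv_reach_eq (l0 :: rest) s L
  rw [hreachlist]
  set reach := (List.range (L + 1)).map (pvRL (l0 :: rest) s) with hre
  have hreach : ∀ k : Nat, k < (l0 :: rest).length →
      PySem.List.pyGetD reach ((k : Nat) : Int) PySem.Set.empty = pvRL (l0 :: rest) s k := by
    intro k hk
    rw [hre, PySem.List.pyGetD_natCast]
    rw [List.getD_eq_getElem _ _ (by simp; simpa [hL] using hk)]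
    simp
  have hlast : PySem.List.pyGetD reach (((L : Nat) : Int) + 1 - 1) PySem.Set.empty
      = pvRL (l0 :: rest) s L := by
    rw [show (((L : Nat) : Int) + 1 - 1) = ((L : Nat) : Int) by ring]
    exact hreach L (by simp [hL])
  rw [hlast]
  have hg0 : ∀ c ∈ pvRL (l0 :: rest) s L,
      ((pvRL (l0 :: rest) s L).foldl (fun d c => d.insert c 1) PySem.Dict.empty).getD c 0
        = pvPC ((l0 :: rest).drop (L + 1)) c := by
    intro c hc
    rw [pv_getD_insertRange (fun _ => 1) _ (pv_nodup_RL _ _ _) c hc]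
    rw [List.drop_eq_nil_of_le (by simp [hL])]
    simp [pvPC]
  have hrange : (((L : Nat) : Int) + 1 - 1) = ((L : Nat) : Int) := by ring
  rw [hrange]
  have hmain := pv_B_back (l0 :: rest) reach s hreach L (by simp [hL]) _ hg0 s
    (by
      show s ∈ PySem.Set.ofList [s]
      rw [PySem.Set.mem_ofList]
      simp)
  rw [hmain]
  simp

-- ===== VERDICT (by name: the statement is the Claim_ definition above) =====
theorem num_rays_spec : Claim_equal_num_rays := by
  intro lines _ hpre
  obtain ⟨hne, hS, _⟩ := hpre
  unfold Spec_num_rays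
  rw [pv_A_eval lines hne hS, pv_B_eval lines hne hS]
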